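-- pv_equiv track=rewrite | github.com/peterbx9/code-mapper | src/code_mapper/linter.py | _is_suppressed
-- ===== SOURCE A (Python) =====
-- _FLAKE8_CODE_TO_RULE = {
--     "F401": "DEAD_IMPORT",
--     "F811": "DEAD_IMPORT",
--     "F841": "UNUSED_PARAM",
--     "W605": "SWALLOWED_EXCEPTION",
--     "B028": "BARE_EXCEPT",
--     "S307": "UNGUARDED_JSON",
-- }
--
-- def _is_suppressed(noqa_lines: dict[int, set[str] | None], line: int, rule: str) -> bool:
--     """True if line carries a noqa comment that suppresses this rule.
--     Matches EXACT rule names or flake8/ruff codes mapped in _FLAKE8_CODE_TO_RULE.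
--     Does not substring-match — `# noqa: I` used to suppress every rule whose
--     name contained 'I' (DEAD_IMPORT, LIST_POP_ZERO, etc.), a silent correctness hole."""
--     codes = noqa_lines.get(line, "__MISS__")
--     if codes == "__MISS__":
--         return False
--     if codes is None:  # bare # noqa
--         return True
--     for c in codes:
--         if c == rule:
--             return True
--         if _FLAKE8_CODE_TO_RULE.get(c) == rule:
--             return True
--     return False
-- ===== SOURCE B (Python) =====
-- _FLAKE8_CODE_TO_RULE = {
--     "F401": "DEAD_IMPORT",
--     "F811": "DEAD_IMPORT",
--     "F841": "UNUSED_PARAM",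
--     "W605": "SWALLOWED_EXCEPTION",
--     "B028": "BARE_EXCEPT",
--     "S307": "UNGUARDED_JSON",
-- }
--
-- # Inverted index: rule -> set of flake8 codes that map to it (built once at import).
-- _RULE_TO_CODES: dict[str, set[str]] = {}
-- for _code, _rule in _FLAKE8_CODE_TO_RULE.items():
--     _RULE_TO_CODES.setdefault(_rule, set()).add(_code)
--
--
-- def _is_suppressed(noqa_lines: dict[int, set[str] | None], line: int, rule: str) -> bool:
--     if line not in noqa_lines:
--         return False
--     codes = noqa_lines[line]
--     if codes is None:  # bare # noqa
--         return True
--     accepted = {rule} | _RULE_TO_CODES.get(rule, set())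
--     return not codes.isdisjoint(accepted)
-- ===== Notes on version B (the rewrite author's own statement) =====
-- stated objective: alternative
-- what changed: B replaces A's per-code loop with dual checks (exact rule, then a flake8-code lookup per element) by a single set-intersection test against a precomputed module-level inverted index _RULE_TO_CODES mapping each rule to its flake8 codes.
import Mathlib
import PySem

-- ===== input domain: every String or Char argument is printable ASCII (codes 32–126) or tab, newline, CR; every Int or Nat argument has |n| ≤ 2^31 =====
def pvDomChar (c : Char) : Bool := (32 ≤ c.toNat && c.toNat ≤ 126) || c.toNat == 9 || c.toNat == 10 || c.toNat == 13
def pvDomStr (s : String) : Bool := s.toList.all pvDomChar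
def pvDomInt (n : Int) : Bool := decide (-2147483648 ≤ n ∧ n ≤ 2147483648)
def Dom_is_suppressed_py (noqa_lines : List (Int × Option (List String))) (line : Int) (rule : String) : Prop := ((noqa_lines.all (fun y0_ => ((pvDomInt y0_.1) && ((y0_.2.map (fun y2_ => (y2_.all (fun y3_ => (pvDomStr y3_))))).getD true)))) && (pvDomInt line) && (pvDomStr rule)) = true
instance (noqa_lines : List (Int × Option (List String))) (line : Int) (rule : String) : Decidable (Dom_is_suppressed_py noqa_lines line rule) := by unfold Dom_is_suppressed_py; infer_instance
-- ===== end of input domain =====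

-- B replaces A's per-element dual-check loop by a single set-disjointness test against
-- a precomputed inverted index (rule -> flake8 codes); alternative decomposition, same cost.


-- ===== PORT A =====
-- _FLAKE8_CODE_TO_RULE (module constant)
def pvFlake8CodeToRule : PySem.Dict String String :=
  PySem.Dict.mk [("F401", "DEAD_IMPORT"), ("F811", "DEAD_IMPORT"),
    ("F841", "UNUSED_PARAM"), ("W605", "SWALLOWED_EXCEPTION"),
    ("B028", "BARE_EXCEPT"), ("S307", "UNGUARDED_JSON")]

-- A's 'for c in codes' loop with its two tests and early return
def pvLoopA (codes : List String) (rule : String) : Bool :=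
  match codes with
  | [] => false
  | c :: rest =>
    if c == rule then true
    else if pvFlake8CodeToRule.get? c == some rule then true
    else pvLoopA rest rule

def is_suppressed_py (noqa_lines : List (Int × Option (List String))) (line : Int) (rule : String) : Bool :=
  -- codes = noqa_lines.get(line, "__MISS__"); the sentinel-miss branch is the 'none' case of get?
  match (PySem.Dict.mk noqa_lines).get? line with
  | none => false
  | some none => true          -- bare # noqa
  | some (some codes) => pvLoopA codes rule

-- ===== PORT B =====
-- _RULE_TO_CODES: module-level inverted index, rule -> set of flake8 codes
def pvRuleToCodes : PySem.Dict String (PySem.Set String) :=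
  PySem.Dict.mk [("DEAD_IMPORT", ["F401", "F811"]), ("UNUSED_PARAM", ["F841"]),
    ("SWALLOWED_EXCEPTION", ["W605"]), ("BARE_EXCEPT", ["B028"]),
    ("UNGUARDED_JSON", ["S307"])]

def is_suppressed_py_alt (noqa_lines : List (Int × Option (List String))) (line : Int) (rule : String) : Bool :=
  let d := PySem.Dict.mk noqa_lines
  if !(d.contains line) then false
  else
    match d.get? line with
    | some none => true        -- bare # noqa
    | some (some codes) =>
      -- accepted = {rule} | _RULE_TO_CODES.get(rule, set()); return not codes.isdisjoint(accepted)
      let accepted : PySem.Set String :=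
        PySem.Set.union (PySem.Set.ofList [rule]) (pvRuleToCodes.getD rule PySem.Set.empty)
      !(PySem.Set.isdisjoint codes accepted)
    | none => false            -- unreachable: d.contains line holds here

-- ===== PRECONDITION & SPEC =====
def Spec_is_suppressed_py (noqa_lines : List (Int × Option (List String))) (line : Int) (rule : String) (out : Bool) : Prop := out = is_suppressed_py_alt noqa_lines line rule
instance (noqa_lines : List (Int × Option (List String))) (line : Int) (rule : String) (out : Bool) : Decidable (Spec_is_suppressed_py noqa_lines line rule out) := by unfold Spec_is_suppressed_py; infer_instance

-- ===== CLAIM (what is proved, stated in full; the proofs are below) =====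
def Claim_equal_is_suppressed_py : Prop := ∀ (noqa_lines : List (Int × Option (List String))) (line : Int) (rule : String), Dom_is_suppressed_py noqa_lines line rule → Spec_is_suppressed_py noqa_lines line rule (is_suppressed_py noqa_lines line rule)

-- ===== LEMMAS AND PROOFS =====

theorem pv_aux (r a b : String) (h : ¬ r = b) : ((a == r) || (b == r)) = decide (r = a) := by
  have hb : (b == r) = false := by
    simp only [beq_eq_false_iff_ne, ne_eq]
    exact fun e => h e.symm
  rw [hb, Bool.or_false]
  by_cases h2 : r = a
  · subst h2; simp
  · have ha : (a == r) = false := by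
      simp only [beq_eq_false_iff_ne, ne_eq]
      exact fun e => h2 e.symm
    rw [ha]
    simp [h2]

theorem pv_aux2 (a b : String) : (a == b) = decide (a = b) := by
  by_cases h : a = b
  · subst h; simp
  · have hf : (a == b) = false := by
      simp only [beq_eq_false_iff_ne, ne_eq]; exact h
    rw [hf]; simp [h]

-- pointwise: A's two tests on one code c equal membership of c in B's accepted set
theorem pv_point (c rule : String) :
    (c == rule || pvFlake8CodeToRule.get? c == some rule) =
      (PySem.Set.union (PySem.Set.ofList [rule]) (pvRuleToCodes.getD rule PySem.Set.empty)).contains c := by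
  simp only [pvFlake8CodeToRule, pvRuleToCodes, PySem.Dict.get?_mk_cons, PySem.Dict.getD,
    PySem.Set.union, PySem.Set.ofList, PySem.Set.empty, PySem.Set.update, PySem.Set.add,
    PySem.Set.contains, List.foldl, List.contains]
  split_ifs <;> (try simp only [beq_iff_eq] at *) <;> (try subst_vars) <;> (try simp_all) <;>
    (try simp_all [PySem.Dict.get?, eq_comm]) <;>
    (try (exact pv_aux _ _ _ (by assumption))) <;> (try (exact pv_aux2 _ _))

-- A's loop is List.any of the pointwise test
theorem pv_loop_any (codes : List String) (rule : String) :
    pvLoopA codes rule =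
      codes.any (fun c =>
        (PySem.Set.union (PySem.Set.ofList [rule]) (pvRuleToCodes.getD rule PySem.Set.empty)).contains c) := by
  induction codes with
  | nil => rfl
  | cons c cs ih =>
    rw [pvLoopA, List.any_cons, ← ih, ← pv_point c rule]
    cases c == rule <;> cases pvFlake8CodeToRule.get? c == some rule <;> simp

-- B's non-disjointness is the same List.any
theorem pv_not_disjoint (codes : List String) (acc : PySem.Set String) :
    (!(PySem.Set.isdisjoint codes acc)) = codes.any (fun c => acc.contains c) := by
  rw [Bool.eq_iff_iff]
  simp only [Bool.not_eq_true', List.any_eq_true]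
  constructor
  · intro hfalse
    by_contra hno
    push Not at hno
    apply absurd hfalse
    simp only [Bool.not_eq_false]
    rw [PySem.Set.isdisjoint_iff]
    intro x hx hmem
    exact hno x hx ((PySem.Set.contains_iff acc x).mpr hmem)
  · rintro ⟨c, hc, hacc⟩
    rw [Bool.eq_false_iff]
    intro hdis
    exact ((PySem.Set.isdisjoint_iff codes acc).mp hdis) c hc ((PySem.Set.contains_iff acc c).mp hacc)

-- ===== VERDICT (by name: the statement is the Claim_ definition above) =====
theorem is_suppressed_py_spec : Claim_equal_is_suppressed_py := by
  intro noqa_lines line rule _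
  unfold Spec_is_suppressed_py is_suppressed_py is_suppressed_py_alt
  cases h : (PySem.Dict.mk noqa_lines).get? line with
  | none => simp [h, PySem.Dict.contains_eq_isSome_get?]
  | some v =>
    cases v with
    | none => simp [h, PySem.Dict.contains_eq_isSome_get?]
    | some codes => simp [h, PySem.Dict.contains_eq_isSome_get?, pv_loop_any, pv_not_disjoint]
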